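-- pv_equiv track=rewrite | github.com/pranjul2206/RamSirFCQ | problem1.py | solve3
-- ===== SOURCE A (Python) =====
-- def solve3(n):
--     arr=[2, 3, 5, 13, 89, 233, 1597, 28657, 514229, 433494437,
--          2971215073, 99194853094755497,1066340417491710595814572169]
--
--     l=0
--     h=len(arr)-1
--     ans=-1
--     while l<=h:
--         mid=(l+h)//2
--         if len(str(arr[mid]))>=n:
--             ans=arr[mid]
--             h=mid-1
--         else:
--             l=mid+1
--     return ans
-- ===== SOURCE B (Python) =====
-- def solve3(n):
--     arr = [2, 3, 5, 13, 89, 233, 1597, 28657, 514229, 433494437,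
--            2971215073, 99194853094755497, 1066340417491710595814572169]
--     return next((x for x in arr if len(str(x)) >= n), -1)
-- ===== Notes on version B (the rewrite author's own statement) =====
-- stated objective: simpler
-- what changed: Replaces the l/h/mid binary search over the constant array (which has monotone non-decreasing digit counts) with a single forward scan returning the first element whose digit count is at least n, with the same no-match sentinel.
import Mathlib
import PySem

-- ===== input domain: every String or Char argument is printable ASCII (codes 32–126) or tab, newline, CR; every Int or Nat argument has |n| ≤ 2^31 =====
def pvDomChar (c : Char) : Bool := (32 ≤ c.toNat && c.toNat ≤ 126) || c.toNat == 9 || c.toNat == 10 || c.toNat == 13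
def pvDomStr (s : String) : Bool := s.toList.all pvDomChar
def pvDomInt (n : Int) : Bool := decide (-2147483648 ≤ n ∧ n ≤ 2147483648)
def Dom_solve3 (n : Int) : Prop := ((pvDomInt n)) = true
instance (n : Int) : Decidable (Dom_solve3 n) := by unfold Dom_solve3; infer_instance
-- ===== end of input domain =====

-- B replaces A's l/h/mid binary search over the constant array (whose digit counts
-- are monotone non-decreasing) with a single forward scan for the first element
-- with at least n digits; simpler, same results including the no-match sentinel.

-- ===== PORT A =====
def solve3Arr : List Int :=
  [2, 3, 5, 13, 89, 233, 1597, 28657, 514229, 433494437,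
   2971215073, 99194853094755497, 1066340417491710595814572169]

-- the while loop of A: state (l, h, ans); fuel only makes the recursion total,
-- 14 iterations is more than the loop can ever take on a 13-element interval.
def solve3Loop (n l h ans : Int) : Nat → Int
  | 0 => ans
  | fuel + 1 =>
    if l ≤ h then
      let mid := PySem.Int.floordiv (l + h) 2
      let v := PySem.List.pyGetD solve3Arr mid 0
      if n ≤ ((PySem.Int.toStr v).length : Int) then
        solve3Loop n l (mid - 1) v fuel
      else
        solve3Loop n (mid + 1) h ans fuel
    else ans

def solve3 (n : Int) : Int :=
  solve3Loop n 0 ((solve3Arr.length : Int) - 1) (-1) 14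

-- ===== PORT B =====
def solve3_alt (n : Int) : Int :=
  (solve3Arr.find? (fun x => n ≤ ((PySem.Int.toStr x).length : Int))).getD (-1)

-- ===== PRECONDITION & SPEC =====
def Spec_solve3 (n : Int) (out : Int) : Prop := out = solve3_alt n
instance (n : Int) (out : Int) : Decidable (Spec_solve3 n out) := by unfold Spec_solve3; infer_instance

-- ===== CLAIM (what is proved, stated in full; the proofs are below) =====
def Claim_equal_solve3 : Prop := ∀ (n : Int), Dom_solve3 n → Spec_solve3 n (solve3 n)

-- ===== LEMMAS AND PROOFS =====

theorem solve3_low (n : Int) (h : n ≤ 1) : solve3 n = 2 := by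
  have c1 : n ≤ ((PySem.Int.toStr (2:Int)).length : Int) := by
    have : ((PySem.Int.toStr (2:Int)).length : Int) = 1 := by decide
    omega
  have c2 : n ≤ ((PySem.Int.toStr (5:Int)).length : Int) := by
    have : ((PySem.Int.toStr (5:Int)).length : Int) = 1 := by decide
    omega
  have c3 : n ≤ ((PySem.Int.toStr (1597:Int)).length : Int) := by
    have : ((PySem.Int.toStr (1597:Int)).length : Int) = 4 := by decide
    omega
  simp [solve3, solve3Loop, solve3Arr, c1, c2, c3,
        PySem.Int.floordiv, PySem.List.pyGetD, PySem.List.pyGet?, PySem.List.pyIdx?]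

theorem solve3_alt_low (n : Int) (h : n ≤ 1) : solve3_alt n = 2 := by
  have c1 : n ≤ ((PySem.Int.toStr (2:Int)).length : Int) := by
    have : ((PySem.Int.toStr (2:Int)).length : Int) = 1 := by decide
    omega
  simp [solve3_alt, solve3Arr, c1]

theorem solve3_high (n : Int) (h : 29 ≤ n) : solve3 n = -1 := by
  have c1 : ¬ n ≤ ((PySem.Int.toStr (1597:Int)).length : Int) := by
    have : ((PySem.Int.toStr (1597:Int)).length : Int) = 4 := by decide
    omega
  have c2 : ¬ n ≤ ((PySem.Int.toStr (433494437:Int)).length : Int) := by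
    have : ((PySem.Int.toStr (433494437:Int)).length : Int) = 9 := by decide
    omega
  have c3 : ¬ n ≤ ((PySem.Int.toStr (99194853094755497:Int)).length : Int) := by
    have : ((PySem.Int.toStr (99194853094755497:Int)).length : Int) = 17 := by decide
    omega
  have c4 : ¬ n ≤ ((PySem.Int.toStr (1066340417491710595814572169:Int)).length : Int) := by
    have : ((PySem.Int.toStr (1066340417491710595814572169:Int)).length : Int) = 28 := by decide
    omega
  simp [solve3, solve3Loop, solve3Arr, c1, c2, c3, c4,
        PySem.Int.floordiv, PySem.List.pyGetD, PySem.List.pyGet?, PySem.List.pyIdx?]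

theorem solve3_alt_high (n : Int) (h : 29 ≤ n) : solve3_alt n = -1 := by
  have len : ∀ x ∈ solve3Arr, ((PySem.Int.toStr x).length : Int) ≤ 28 := by decide
  have hn : List.find? (fun x => decide (n ≤ ((PySem.Int.toStr x).length : Int))) solve3Arr
      = none := by
    rw [List.find?_eq_none]
    intro x hx
    simp only [decide_eq_true_eq]
    have := len x hx
    omega
  simp [solve3_alt, hn]

-- ===== VERDICT (by name: the statement is the Claim_ definition above) =====
theorem solve3_spec : Claim_equal_solve3 := by
  intro n _
  show solve3 n = solve3_alt n
  by_cases hlo : n ≤ 1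
  · rw [solve3_low n hlo, solve3_alt_low n hlo]
  · by_cases hhi : 29 ≤ n
    · rw [solve3_high n hhi, solve3_alt_high n hhi]
    · have h2 : 2 ≤ n := by omega
      have h28 : n ≤ 28 := by omega
      interval_cases n <;> decide
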